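-- pv_equiv track=rewrite | github.com/anonymous-cl-code/POEMetric | POEMetric_rule-based_form_accuracy.py | is_pantoum
-- ===== SOURCE A (Python) =====
-- def is_pantoum(meter_analysis, rhyme_analysis):
--     # pre-check
--     if (len(rhyme_analysis) < 8) or (len(rhyme_analysis) % 4 != 0):
--         return False
--
--     # divide quatrains (4-line stanzas)
--     stanzas = []
--     current_stanza = []
--
--     for index, item in enumerate(meter_analysis):
--         words = item[0]
--         current_stanza.append(words)
--
--         if (index + 1) % 4 == 0:
--             stanzas.append(current_stanza)  # add to stanzas
--             current_stanza = []
--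
--     # check repetition
--     for i in range(len(stanzas) - 1):
--         if (stanzas[i][1] != stanzas[i + 1][0]) or \
--                 (stanzas[i][3] != stanzas[i + 1][2]):
--             return False
--
--     # check first and last quatrain repetiion
--     return (stanzas[-1][1] == stanzas[0][0]) and \
--         (stanzas[-1][3] == stanzas[0][2])
-- ===== SOURCE B (Python) =====
-- def is_pantoum(meter_analysis, rhyme_analysis):
--     if len(rhyme_analysis) < 8 or len(rhyme_analysis) % 4 != 0:
--         return False
--     # split the first words into four column lists (line 1..4 of each full quatrain),
--     # then check the pantoum rule as two whole-list rotation equalities: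
--     # the seconds column must be the firsts column rotated left by one, and
--     # the fourths column must be the thirds column rotated left by one.
--     firsts, seconds, thirds, fourths = [], [], [], []
--     rest = [item[0] for item in meter_analysis]
--     while len(rest) >= 4:
--         a, b, c, d = rest[:4]
--         firsts.append(a)
--         seconds.append(b)
--         thirds.append(c)
--         fourths.append(d)
--         rest = rest[4:]
--     return seconds == firsts[1:] + firsts[:1] and fourths == thirds[1:] + thirds[:1]
-- ===== Notes on version B (the rewrite author's own statement) =====
-- stated objective: alternative
-- what changed: B replaces A's stanza list plus pairwise consecutive-stanza loop and separate last-vs-first wraparound check by splitting the first words into four column lists (lines 1..4 of each quatrain) and checking the pantoum rule as two whole-list rotation equalities (seconds == rotate-left(firsts), fourths == rotate-left(thirds)), with no pairwise comparison loop at all.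
import Mathlib
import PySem

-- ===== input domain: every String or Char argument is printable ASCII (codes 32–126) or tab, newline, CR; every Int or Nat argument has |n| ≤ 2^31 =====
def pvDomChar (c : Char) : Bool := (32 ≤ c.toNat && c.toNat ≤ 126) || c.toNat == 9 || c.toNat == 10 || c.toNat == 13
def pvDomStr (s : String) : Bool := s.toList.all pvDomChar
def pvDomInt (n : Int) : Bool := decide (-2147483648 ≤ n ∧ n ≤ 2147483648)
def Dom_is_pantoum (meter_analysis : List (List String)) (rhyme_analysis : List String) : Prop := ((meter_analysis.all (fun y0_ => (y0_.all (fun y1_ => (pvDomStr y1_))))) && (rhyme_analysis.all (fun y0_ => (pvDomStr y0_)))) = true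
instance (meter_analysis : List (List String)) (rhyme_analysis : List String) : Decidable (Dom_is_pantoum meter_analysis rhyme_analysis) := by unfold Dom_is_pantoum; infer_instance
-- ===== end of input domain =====

-- B replaces A's stanza list, pairwise consecutive-stanza loop and separate wraparound
-- check by four column lists checked with two whole-list rotation equalities (objective: alternative).


-- ===== PORT A =====
-- A's stanza-building loop: current_stanza accumulates item[0] (ported as headD "", exact
-- under Pre_, which makes every accessed inner list nonempty), flushed every 4th item.
def pantoumBuild : List (List String) → List String → Nat → List (List String)
  | [], _, _ => []
  | item :: rest, cur, idx =>
    let words := item.headD ""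
    let cur' := cur ++ [words]
    if (idx + 1) % 4 = 0 then cur' :: pantoumBuild rest [] (idx + 1)
    else pantoumBuild rest cur' (idx + 1)

-- stanzas[i][j] and stanzas[-1] are in range under Pre_ (each stanza has 4 lines and,
-- when the rhyme pre-check passes, Pre_ gives at least one stanza), so getD is exact there.
def is_pantoum (meter_analysis : List (List String)) (rhyme_analysis : List String) : Bool :=
  if rhyme_analysis.length < 8 ∨ rhyme_analysis.length % 4 ≠ 0 then false
  else
    let stanzas := pantoumBuild meter_analysis [] 0
    let get := fun i j => (stanzas.getD i []).getD j ""
    ((List.range (stanzas.length - 1)).all (fun i =>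
        (get i 1 == get (i + 1) 0) && (get i 3 == get (i + 1) 2)))
      && ((get (stanzas.length - 1) 1 == get 0 0) && (get (stanzas.length - 1) 3 == get 0 2))

-- ===== PORT B =====
-- B's while-loop: peel four first words at a time into the four column accumulators.
-- item[0] is ported as headD "" (exact under Pre_; if rest has < 4 elements the loop stops).
def colsLoop : List String → List String → List String → List String → List String →
    List String × List String × List String × List String
  | a :: b :: c :: d :: rest, f, s, t, u =>
      colsLoop rest (f ++ [a]) (s ++ [b]) (t ++ [c]) (u ++ [d])
  | _, f, s, t, u => (f, s, t, u)

def is_pantoum_alt (meter_analysis : List (List String)) (rhyme_analysis : List String) : Bool :=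
  if rhyme_analysis.length < 8 ∨ rhyme_analysis.length % 4 ≠ 0 then false
  else
    let (f, s, t, u) := colsLoop (meter_analysis.map (fun item => item.headD "")) [] [] [] []
    (s == f.drop 1 ++ f.take 1) && (u == t.drop 1 ++ t.take 1)

-- ===== PRECONDITION & SPEC =====
-- Pre_ excludes exactly the inputs where A raises IndexError: when the rhyme pre-check
-- passes, A reads item[0] of every meter entry (so all must be nonempty) and stanzas[-1]
-- (so there must be at least one full quatrain, i.e. 4 ≤ length).
def Pre_is_pantoum (meter_analysis : List (List String)) (rhyme_analysis : List String) : Prop :=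
  (rhyme_analysis.length < 8 ∨ rhyme_analysis.length % 4 ≠ 0) ∨
  (4 ≤ meter_analysis.length ∧ ∀ x ∈ meter_analysis, x ≠ [])

instance (meter_analysis : List (List String)) (rhyme_analysis : List String) : Decidable (Pre_is_pantoum meter_analysis rhyme_analysis) := by unfold Pre_is_pantoum; infer_instance

def pvWitness_is_pantoum : List (List String) × List String :=
  ([["a"], ["b"], ["c"], ["d"], ["b"], ["e"], ["d"], ["f"]],
   ["a", "b", "a", "b", "b", "c", "b", "c"])

def Spec_is_pantoum (meter_analysis : List (List String)) (rhyme_analysis : List String) (out : Bool) : Prop := out = is_pantoum_alt meter_analysis rhyme_analysis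
instance (meter_analysis : List (List String)) (rhyme_analysis : List String) (out : Bool) : Decidable (Spec_is_pantoum meter_analysis rhyme_analysis out) := by unfold Spec_is_pantoum; infer_instance

-- ===== CLAIM (what is proved, stated in full; the proofs are below) =====
def Claim_equal_is_pantoum : Prop := ∀ (meter_analysis : List (List String)) (rhyme_analysis : List String), Dom_is_pantoum meter_analysis rhyme_analysis → Pre_is_pantoum meter_analysis rhyme_analysis → Spec_is_pantoum meter_analysis rhyme_analysis (is_pantoum meter_analysis rhyme_analysis)

-- ===== LEMMAS AND PROOFS =====

-- the complete 4-chunks of a list (A's stanza list, characterised)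
def chunks4 : List String → List (List String)
  | a :: b :: c :: d :: rest => [a, b, c, d] :: chunks4 rest
  | _ => []

-- column j of the stanza table
def colJ (j : Nat) (l : List String) : List String :=
  (chunks4 l).map (fun st => st.getD j "")

theorem pantoumBuild_eq_chunks4 : ∀ (m : List (List String)) (cur : List String) (idx : Nat),
    cur.length = idx % 4 →
    pantoumBuild m cur idx = chunks4 (cur ++ m.map (fun item => item.headD "")) := by
  intro m
  induction m with
  | nil =>
    intro cur idx h
    have hlt : cur.length < 4 := h ▸ Nat.mod_lt idx (by norm_num)
    match cur, hlt with
    | [], _ => simp [pantoumBuild, chunks4]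
    | [a], _ => simp [pantoumBuild, chunks4]
    | [a, b], _ => simp [pantoumBuild, chunks4]
    | [a, b, c], _ => simp [pantoumBuild, chunks4]
  | cons item rest ih =>
    intro cur idx h
    by_cases h4 : (idx + 1) % 4 = 0
    · have h3 : cur.length = 3 := by omega
      obtain ⟨a, b, c, rfl⟩ := List.length_eq_three.mp h3
      simp only [pantoumBuild, if_pos h4]
      rw [ih [] (idx + 1) (by simp [h4])]
      simp [chunks4]
    · simp only [pantoumBuild, if_neg h4]
      rw [ih (cur ++ [item.headD ""]) (idx + 1) (by simp; omega)]
      simp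

theorem chunks4_short (l : List String) (h : l.length < 4) : chunks4 l = [] := by
  match l, h with
  | [], _ => rfl
  | [a], _ => rfl
  | [a, b], _ => rfl
  | [a, b, c], _ => rfl

theorem chunks4_length : ∀ (l : List String), (chunks4 l).length = l.length / 4 := by
  intro l
  induction l using chunks4.induct with
  | case1 a b c d rest ih => simp [chunks4, ih]; omega
  | case2 l h =>
    have hlt : l.length < 4 := by
      match l, h with
      | [], _ => simp
      | [a], _ => simp
      | [a, b], _ => simp
      | [a, b, c], _ => simp
      | a :: b :: c :: d :: r, h => exact absurd rfl (h a b c d r)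
    rw [chunks4_short l hlt]
    simp; omega

-- B's loop produces exactly the four columns of the stanza table
theorem colsLoop_eq : ∀ (l f s t u : List String),
    colsLoop l f s t u = (f ++ colJ 0 l, s ++ colJ 1 l, t ++ colJ 2 l, u ++ colJ 3 l) := by
  intro l
  induction l using chunks4.induct with
  | case1 a b c d rest ih =>
    intro f s t u
    simp only [colsLoop, ih, colJ, chunks4]
    simp
  | case2 l h =>
    intro f s t u
    have hlt : l.length < 4 := by
      match l, h with
      | [], _ => simp
      | [a], _ => simp
      | [a, b], _ => simp
      | [a, b, c], _ => simp
      | a :: b :: c :: d :: r, h => exact absurd rfl (h a b c d r)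
    have hc : chunks4 l = [] := chunks4_short l hlt
    match l, hlt with
    | [], _ => simp [colsLoop, colJ, hc]
    | [a], _ => simp [colsLoop, colJ, hc]
    | [a, b], _ => simp [colsLoop, colJ, hc]
    | [a, b, c], _ => simp [colsLoop, colJ, hc]

theorem colJ_length (j : Nat) (l : List String) : (colJ j l).length = (chunks4 l).length := by
  simp [colJ]

theorem colJ_getD (j : Nat) (l : List String) (i : Nat) (hi : i < (chunks4 l).length) :
    (colJ j l).getD i "" = ((chunks4 l).getD i []).getD j "" := by
  rw [colJ, List.getD_eq_getElem _ _ (by simpa using hi), List.getElem_map,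
    List.getD_eq_getElem _ _ hi]

-- rotation-by-one as a pointwise condition
theorem rot_iff (a b : List String) (hlen : b.length = a.length) (hn : 1 ≤ a.length) :
    (b = a.drop 1 ++ a.take 1) ↔
      ((∀ i, i < a.length - 1 → b.getD i "" = a.getD (i + 1) "") ∧
        b.getD (a.length - 1) "" = a.getD 0 "") := by
  have hlen2 : (a.drop 1 ++ a.take 1).length = a.length := by
    simp; omega
  constructor
  · intro h
    subst h
    constructor
    · intro i hi
      rw [List.getD_eq_getElem _ _ (by omega), List.getD_eq_getElem _ _ (by omega)]
      rw [List.getElem_append_left (by simp; omega)]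
      simp
    · rw [List.getD_eq_getElem _ _ (by omega), List.getD_eq_getElem _ _ (by omega)]
      rw [List.getElem_append_right (by simp)]
      simp [List.getElem_take]
  · intro ⟨h1, h2⟩
    apply List.ext_getElem (by omega)
    intro i hib hir
    rw [show b[i] = b.getD i "" from (List.getD_eq_getElem _ _ hib).symm]
    by_cases hi : i < a.length - 1
    · rw [h1 i hi, List.getElem_append_left (by simp; omega),
        List.getD_eq_getElem _ _ (by omega)]
      simp
    · have : i = a.length - 1 := by rw [hlen2] at hir; omega
      subst this
      rw [h2, List.getElem_append_right (by simp), List.getD_eq_getElem _ _ (by omega)]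
      simp [List.getElem_take]

-- A's two checks over the stanza table equal B's two rotation equalities over the columns.
theorem check_eq (lines : List String) (hlen4 : 4 ≤ lines.length) :
    (((List.range ((chunks4 lines).length - 1)).all (fun i =>
        (((chunks4 lines).getD i []).getD 1 "" == ((chunks4 lines).getD (i + 1) []).getD 0 "") &&
        (((chunks4 lines).getD i []).getD 3 "" == ((chunks4 lines).getD (i + 1) []).getD 2 "")))
      && ((((chunks4 lines).getD ((chunks4 lines).length - 1) []).getD 1 "" == ((chunks4 lines).getD 0 []).getD 0 "") &&
          (((chunks4 lines).getD ((chunks4 lines).length - 1) []).getD 3 "" == ((chunks4 lines).getD 0 []).getD 2 "")))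
    = ((colJ 1 lines == (colJ 0 lines).drop 1 ++ (colJ 0 lines).take 1) &&
       (colJ 3 lines == (colJ 2 lines).drop 1 ++ (colJ 2 lines).take 1)) := by
  have hn : 1 ≤ (chunks4 lines).length := by rw [chunks4_length]; omega
  rw [Bool.eq_iff_iff]
  simp only [Bool.and_eq_true, List.all_eq_true, List.mem_range, beq_iff_eq]
  rw [rot_iff _ _ (by rw [colJ_length, colJ_length]) (by rw [colJ_length]; exact hn),
    rot_iff _ _ (by rw [colJ_length, colJ_length]) (by rw [colJ_length]; exact hn)]
  rw [colJ_length 0, colJ_length 2]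
  constructor
  · rintro ⟨hpairs, hw1, hw2⟩
    refine ⟨⟨?_, ?_⟩, ?_, ?_⟩
    · intro i hi
      rw [colJ_getD 1 lines i (by omega), colJ_getD 0 lines (i + 1) (by omega)]
      exact (hpairs i hi).1
    · rw [colJ_getD 1 lines _ (by omega), colJ_getD 0 lines 0 (by omega)]
      exact hw1
    · intro i hi
      rw [colJ_getD 3 lines i (by omega), colJ_getD 2 lines (i + 1) (by omega)]
      exact (hpairs i hi).2
    · rw [colJ_getD 3 lines _ (by omega), colJ_getD 2 lines 0 (by omega)]
      exact hw2
  · rintro ⟨⟨h1, h1w⟩, h2, h2w⟩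
    refine ⟨fun i hi => ⟨?_, ?_⟩, ?_, ?_⟩
    · have := h1 i hi
      rwa [colJ_getD 1 lines i (by omega), colJ_getD 0 lines (i + 1) (by omega)] at this
    · have := h2 i hi
      rwa [colJ_getD 3 lines i (by omega), colJ_getD 2 lines (i + 1) (by omega)] at this
    · have := h1w
      rwa [colJ_getD 1 lines _ (by omega), colJ_getD 0 lines 0 (by omega)] at this
    · have := h2w
      rwa [colJ_getD 3 lines _ (by omega), colJ_getD 2 lines 0 (by omega)] at this

theorem is_pantoum_eq_alt (m : List (List String)) (r : List String) (hm : 4 ≤ m.length) :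
    is_pantoum m r = is_pantoum_alt m r := by
  by_cases hr : r.length < 8 ∨ r.length % 4 ≠ 0
  · simp [is_pantoum, is_pantoum_alt, hr]
  · have hbuild := pantoumBuild_eq_chunks4 m [] 0 rfl
    rw [List.nil_append] at hbuild
    have hml : (m.map (fun item => item.headD "")).length = m.length := List.length_map ..
    simp only [is_pantoum, is_pantoum_alt, if_neg hr, hbuild, colsLoop_eq, List.nil_append]
    exact check_eq (m.map (fun item => item.headD "")) (by rw [hml]; omega)

-- ===== VERDICT (by name: the statement is the Claim_ definition above) =====
theorem is_pantoum_spec : Claim_equal_is_pantoum := by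
  intro m r _dom hpre
  unfold Spec_is_pantoum
  rcases hpre with hr | ⟨hm, _⟩
  · simp [is_pantoum, is_pantoum_alt, hr]
  · exact is_pantoum_eq_alt m r hm
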